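-- pv_equiv track=rewrite | github.com/its-shivam-awasthi/COBIS | cobbi_blocked.py | _gallop_left
-- ===== SOURCE A (Python) =====
-- def _lt(v1, s1, v2, s2):  # (v1,s1) < (v2,s2)
--     if v1 < v2: return True
--     if v1 > v2: return False
--     return s1 < s2
--
-- def _gallop_left(xv, xs, bv, bsq, lo, hi):
--     # first idx in bv[lo:hi] where (bv[idx],bsq[idx]) >= (xv,xs)
--     n = hi - lo
--     if n <= 0: return lo
--     if not _lt(bv[lo], bsq[lo], xv, xs):
--         return lo
--     ofs = 1; idx = lo
--     while ofs < n and _lt(bv[lo + ofs], bsq[lo + ofs], xv, xs):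
--         idx = lo + ofs
--         ofs = (ofs << 1) + 1
--         if lo + ofs >= hi:
--             ofs = n - 1
--             break
--     left = idx + 1
--     right = min(lo + ofs, hi - 1)
--     ans = right + 1
--     while left <= right:
--         mid = (left + right) // 2
--         if _lt(bv[mid], bsq[mid], xv, xs):
--             left = mid + 1
--         else:
--             ans = mid
--             right = mid - 1
--     return ans
-- ===== SOURCE B (Python) =====
-- def _lt(v1, s1, v2, s2):  # (v1,s1) < (v2,s2)
--     if v1 < v2: return True
--     if v1 > v2: return False
--     return s1 < s2
--
-- def _gallop_left(xv, xs, bv, bsq, lo, hi):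
--     # first idx in bv[lo:hi] where (bv[idx],bsq[idx]) >= (xv,xs):
--     # plain binary search over the whole range, no galloping phase
--     if hi - lo <= 0:
--         return lo
--     left, right, ans = lo, hi - 1, hi
--     while left <= right:
--         mid = (left + right) // 2
--         if _lt(bv[mid], bsq[mid], xv, xs):
--             left = mid + 1
--         else:
--             ans = mid
--             right = mid - 1
--     return ans
-- ===== Notes on version B (the rewrite author's own statement) =====
-- stated objective: simpler
-- what changed: Replaces A's two-phase galloping search (exponential-offset bracketing loop followed by a binary search inside the bracket) with one plain binary search over the whole range [lo, hi).
-- outside the precondition, e.g. on _gallop_left(0, -3, [1, -3, 2, 2], [0, -1, 3, 3], 0, 3): A returns 0, B returns 2; on _gallop_left(3, 0, [-3, 1, 3], [-1, 3, 3], -3, 2): A returns 2, B returns -1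
import Mathlib
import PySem

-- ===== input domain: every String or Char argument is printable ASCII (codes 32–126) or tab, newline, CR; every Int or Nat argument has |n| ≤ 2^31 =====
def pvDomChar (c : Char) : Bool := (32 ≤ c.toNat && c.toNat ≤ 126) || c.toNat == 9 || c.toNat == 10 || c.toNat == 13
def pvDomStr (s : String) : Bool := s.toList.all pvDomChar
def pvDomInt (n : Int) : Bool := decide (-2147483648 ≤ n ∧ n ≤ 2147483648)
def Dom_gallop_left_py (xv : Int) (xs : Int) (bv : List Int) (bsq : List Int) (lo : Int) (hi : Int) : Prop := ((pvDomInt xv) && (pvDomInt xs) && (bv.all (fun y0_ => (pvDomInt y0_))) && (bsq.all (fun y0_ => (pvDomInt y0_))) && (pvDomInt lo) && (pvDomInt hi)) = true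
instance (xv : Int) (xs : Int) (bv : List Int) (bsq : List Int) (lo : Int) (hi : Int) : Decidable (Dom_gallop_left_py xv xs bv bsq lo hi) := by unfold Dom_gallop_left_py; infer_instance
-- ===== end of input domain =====

-- B replaces A's two-phase galloping search with one plain binary search over [lo, hi): simpler, same result on sorted ranges.

-- ===== PORT A =====
-- Python helper _lt(v1, s1, v2, s2): lexicographic (v1,s1) < (v2,s2)
def pyLt (v1 : Int) (s1 : Int) (v2 : Int) (s2 : Int) : Bool :=
  if v1 < v2 then true else if v1 > v2 then false else decide (s1 < s2)

-- _lt(bv[i], bsq[i], xv, xs); indexing is exact on Pre_'s in-range indices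
def ltAt (xv : Int) (xs : Int) (bv : List Int) (bsq : List Int) (i : Int) : Bool :=
  pyLt (PySem.List.pyGetD bv i 0) (PySem.List.pyGetD bsq i 0) xv xs

-- A's galloping while-loop; fuel only makes the loop total (it is provably sufficient under Pre_)
def gallopPhase (p : Int → Bool) (lo : Int) (hi : Int) (n : Int) : Nat → Int → Int → Int × Int
  | 0, ofs, idx => (ofs, idx)
  | Nat.succ f, ofs, idx =>
    if ofs < n ∧ p (lo + ofs) = true then
      let idx' := lo + ofs
      let ofs' := 2 * ofs + 1
      if hi ≤ lo + ofs' then (n - 1, idx')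
      else gallopPhase p lo hi n f ofs' idx'
    else (ofs, idx)

-- A's binary-search while-loop; fuel only makes the loop total
def binPhase (p : Int → Bool) : Nat → Int → Int → Int → Int
  | 0, _, _, ans => ans
  | Nat.succ f, left, right, ans =>
    if left ≤ right then
      let mid := PySem.Int.floordiv (left + right) 2
      if p mid then binPhase p f (mid + 1) right ans
      else binPhase p f left (mid - 1) mid
    else ans

def gallop_left_py (xv : Int) (xs : Int) (bv : List Int) (bsq : List Int) (lo : Int) (hi : Int) : Int :=
  let n := hi - lo
  if n ≤ 0 then lo
  else if ltAt xv xs bv bsq lo = false then lo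
  else
    let r := gallopPhase (ltAt xv xs bv bsq) lo hi n (n.toNat + 1) 1 lo
    let left := r.2 + 1
    let right := min (lo + r.1) (hi - 1)
    binPhase (ltAt xv xs bv bsq) (n.toNat + 1) left (right) (right + 1)

-- ===== PORT B =====
-- B's single binary-search while-loop over the full range; fuel only makes the loop total
def bsearchLoop (p : Int → Bool) : Nat → Int → Int → Int → Int
  | 0, _, _, ans => ans
  | Nat.succ f, left, right, ans =>
    if left ≤ right then
      let mid := PySem.Int.floordiv (left + right) 2
      if p mid then bsearchLoop p f (mid + 1) right ans
      else bsearchLoop p f left (mid - 1) mid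
    else ans

def gallop_left_py_alt (xv : Int) (xs : Int) (bv : List Int) (bsq : List Int) (lo : Int) (hi : Int) : Int :=
  if hi - lo ≤ 0 then lo
  else bsearchLoop (ltAt xv xs bv bsq) ((hi - lo).toNat + 1) lo (hi - 1) hi

-- ===== PRECONDITION & SPEC =====
-- Pre_ excludes non-empty ranges [lo,hi) that are out of bounds or not sorted by the (bv[i],bsq[i]) pairs —
-- the documented contract of this sorted-range search: out-of-range indices raise IndexError in Python, and on
-- unsorted ranges or negative-index wraparound the sequence of probed elements (hence either result) is accidental.
def Pre_gallop_left_py (xv : Int) (xs : Int) (bv : List Int) (bsq : List Int) (lo : Int) (hi : Int) : Prop :=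
  hi ≤ lo ∨
    (0 ≤ lo ∧ hi ≤ (bv.length : Int) ∧ hi ≤ (bsq.length : Int) ∧
      ∀ i ∈ List.range hi.toNat, lo ≤ (i : Int) → (i : Int) + 1 < hi →
        (PySem.List.pyGetD bv (i : Int) 0 < PySem.List.pyGetD bv ((i : Int) + 1) 0 ∨
          (PySem.List.pyGetD bv (i : Int) 0 = PySem.List.pyGetD bv ((i : Int) + 1) 0 ∧
           PySem.List.pyGetD bsq (i : Int) 0 ≤ PySem.List.pyGetD bsq ((i : Int) + 1) 0)))

instance (xv : Int) (xs : Int) (bv : List Int) (bsq : List Int) (lo : Int) (hi : Int) : Decidable (Pre_gallop_left_py xv xs bv bsq lo hi) := by unfold Pre_gallop_left_py; infer_instance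

def pvWitness_gallop_left_py : Int × Int × List Int × List Int × Int × Int := (0, 0, [0, 1], [0, 2], 0, 2)

def Spec_gallop_left_py (xv : Int) (xs : Int) (bv : List Int) (bsq : List Int) (lo : Int) (hi : Int) (out : Int) : Prop := out = gallop_left_py_alt xv xs bv bsq lo hi
instance (xv : Int) (xs : Int) (bv : List Int) (bsq : List Int) (lo : Int) (hi : Int) (out : Int) : Decidable (Spec_gallop_left_py xv xs bv bsq lo hi out) := by unfold Spec_gallop_left_py; infer_instance

-- ===== CLAIM (what is proved, stated in full; the proofs are below) =====
def Claim_equal_gallop_left_py : Prop := ∀ (xv : Int) (xs : Int) (bv : List Int) (bsq : List Int) (lo : Int) (hi : Int), Dom_gallop_left_py xv xs bv bsq lo hi → Pre_gallop_left_py xv xs bv bsq lo hi → Spec_gallop_left_py xv xs bv bsq lo hi (gallop_left_py xv xs bv bsq lo hi)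

-- ===== LEMMAS AND PROOFS =====

-- linear-scan specification: first index ≥ i (within k steps) where p fails
def scanT (p : Int → Bool) : Nat → Int → Int
  | 0, i => i
  | Nat.succ k, i => if p i then scanT p k (i + 1) else i

theorem scanT_ge (p : Int → Bool) : ∀ (k : Nat) (i : Int), i ≤ scanT p k i := by
  intro k
  induction k with
  | zero => intro i; simp [scanT]
  | succ k ih =>
    intro i
    simp only [scanT]
    split
    · exact le_trans (by omega) (ih (i + 1))
    · exact le_refl i

theorem scanT_le (p : Int → Bool) : ∀ (k : Nat) (i : Int), scanT p k i ≤ i + k := by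
  intro k
  induction k with
  | zero => intro i; simp [scanT]
  | succ k ih =>
    intro i
    simp only [scanT]
    split
    · have := ih (i + 1); push_cast; omega
    · push_cast; omega

theorem scanT_true (p : Int → Bool) : ∀ (k : Nat) (i j : Int), i ≤ j → j < scanT p k i → p j = true := by
  intro k
  induction k with
  | zero => intro i j h1 h2; simp [scanT] at h2; omega
  | succ k ih =>
    intro i j h1 h2
    simp only [scanT] at h2
    by_cases hp : p i = true
    · rw [if_pos hp] at h2
      by_cases hij : j = i
      · subst hij; exact hp
      · exact ih (i + 1) j (by omega) h2
    · rw [if_neg hp] at h2; omega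

theorem scanT_stop (p : Int → Bool) : ∀ (k : Nat) (i : Int), scanT p k i = i + k ∨ p (scanT p k i) = false := by
  intro k
  induction k with
  | zero => intro i; left; simp [scanT]
  | succ k ih =>
    intro i
    simp only [scanT]
    by_cases hp : p i = true
    · rw [if_pos hp]
      rcases ih (i + 1) with h | h
      · left; push_cast; omega
      · right; exact h
    · rw [if_neg hp]
      right
      simp only [Bool.not_eq_true] at hp
      exact hp

-- the binary-search loop computes T, the first index where p fails, given the bracketing invariant
theorem binPhase_eq (p : Int → Bool) (lo hi T : Int)
    (htrue : ∀ j, lo ≤ j → j < T → p j = true)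
    (hfalse : ∀ j, T ≤ j → j < hi → p j = false) :
    ∀ (f : Nat) (left right ans : Int),
      lo ≤ left → right ≤ hi - 1 → left ≤ T → T ≤ ans → ans = right + 1 →
      (right + 1 - left).toNat < f →
      binPhase p f left right ans = T := by
  intro f
  induction f with
  | zero => intro left right ans _ _ _ _ _ h6; omega
  | succ f ih =>
    intro left right ans h1 h2 h3 h4 h5 h6
    simp only [binPhase]
    by_cases hc : left ≤ right
    · rw [if_pos hc]
      have hmid := PySem.Int.floordiv_two_mid_bounds hc
      set mid := PySem.Int.floordiv (left + right) 2 with hm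
      by_cases hp : p mid = true
      · rw [if_pos hp]
        have hmT : mid < T := by
          by_contra hx
          push Not at hx
          have := hfalse mid hx (by omega)
          rw [hp] at this; exact absurd this (by simp)
        exact ih (mid + 1) right ans (by omega) h2 (by omega) h4 h5 (by omega)
      · rw [if_neg hp]
        have hTm : T ≤ mid := by
          by_contra hx
          push Not at hx
          exact hp (htrue mid (by omega) hx)
        exact ih left (mid - 1) mid h1 (by omega) h3 hTm (by omega) (by omega)
    · rw [if_neg hc]
      omega

theorem bsearch_eq_bin (p : Int → Bool) : ∀ (f : Nat) (left right ans : Int),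
    bsearchLoop p f left right ans = binPhase p f left right ans := by
  intro f
  induction f with
  | zero => intro left right ans; rfl
  | succ f ih =>
    intro left right ans
    simp only [bsearchLoop, binPhase]
    by_cases hc : left ≤ right
    · rw [if_pos hc, if_pos hc]
      by_cases hp : p (PySem.Int.floordiv (left + right) 2) = true
      · rw [if_pos hp, if_pos hp, ih]
      · rw [if_neg hp, if_neg hp, ih]
    · rw [if_neg hc, if_neg hc]

-- the galloping phase ends with a true index and a bracket whose right end is at least T - 1
theorem gallop_inv (p : Int → Bool) (lo hi T : Int)
    (htrue : ∀ j, lo ≤ j → j < T → p j = true)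
    (hThi : T ≤ hi) :
    ∀ (f : Nat) (ofs idx : Int), 1 ≤ ofs → lo ≤ idx → idx < hi → p idx = true →
      (hi - lo - ofs).toNat < f →
      (p (gallopPhase p lo hi (hi - lo) f ofs idx).2 = true ∧
       lo ≤ (gallopPhase p lo hi (hi - lo) f ofs idx).2 ∧
       (gallopPhase p lo hi (hi - lo) f ofs idx).2 < hi ∧
       T ≤ min (lo + (gallopPhase p lo hi (hi - lo) f ofs idx).1) (hi - 1) + 1) := by
  intro f
  induction f with
  | zero => intro ofs idx _ _ _ _ h5; omega
  | succ f ih =>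
    intro ofs idx h1 h2 h3 h4 h5
    simp only [gallopPhase]
    by_cases hc : ofs < hi - lo ∧ p (lo + ofs) = true
    · rw [if_pos hc]
      by_cases hb : hi ≤ lo + (2 * ofs + 1)
      · rw [if_pos hb]
        refine ⟨hc.2, by omega, by omega, ?_⟩
        have : min (lo + (hi - lo - 1)) (hi - 1) = hi - 1 := by omega
        omega
      · rw [if_neg hb]
        exact ih (2 * ofs + 1) (lo + ofs) (by omega) (by omega) (by omega) hc.2 (by omega)
    · rw [if_neg hc]
      refine ⟨h4, h2, h3, ?_⟩
      by_cases hofs : ofs < hi - lo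
      · have hpf : p (lo + ofs) = false := by
          by_cases h : p (lo + ofs) = true
          · exact absurd ⟨hofs, h⟩ hc
          · simpa using h
        have hT : T ≤ lo + ofs := by
          by_contra hx
          push Not at hx
          have := htrue (lo + ofs) (by omega) hx
          rw [hpf] at this; exact absurd this (by simp)
        have : min (lo + ofs) (hi - 1) = lo + ofs := by omega
        omega
      · have : min (lo + ofs) (hi - 1) = hi - 1 := by omega
        omega

-- ===== VERDICT (by name: the statement is the Claim_ definition above) =====
theorem gallop_left_py_spec : Claim_equal_gallop_left_py := by
  intro xv xs bv bsq lo hi _ hpre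
  unfold Spec_gallop_left_py gallop_left_py gallop_left_py_alt
  by_cases hn : hi - lo ≤ 0
  · simp only [hn, if_pos]
  · rw [if_neg hn, if_neg hn]
    rcases hpre with h | ⟨hlo, hbv, hbsq, hsort⟩
    · omega
    set p := ltAt xv xs bv bsq with hp
    -- adjacent sortedness, Int-indexed
    have hsortI : ∀ i : Int, lo ≤ i → i + 1 < hi →
        (PySem.List.pyGetD bv i 0 < PySem.List.pyGetD bv (i + 1) 0 ∨
          (PySem.List.pyGetD bv i 0 = PySem.List.pyGetD bv (i + 1) 0 ∧
           PySem.List.pyGetD bsq i 0 ≤ PySem.List.pyGetD bsq (i + 1) 0)) := by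
      intro i hi1 hi2
      have h0 : (0 : Int) ≤ i := by omega
      have hcast : ((i.toNat : Int)) = i := Int.toNat_of_nonneg h0
      have hmem : i.toNat ∈ List.range hi.toNat := by
        rw [List.mem_range]; omega
      have := hsort i.toNat hmem (by rw [hcast]; exact hi1) (by rw [hcast]; omega)
      rw [hcast] at this
      exact this
    have hlt_iff : ∀ a b c d : Int, pyLt a b c d = true ↔ (a < c ∨ (a = c ∧ b < d)) := by
      intro a b c d
      unfold pyLt
      split_ifs <;> simp <;> omega
    -- one sortedness step for the predicate
    have hstep : ∀ i : Int, lo ≤ i → i + 1 < hi → p (i + 1) = true → p i = true := by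
      intro i h1 h2 h3
      have hs := hsortI i h1 h2
      rw [hp] at h3 ⊢
      unfold ltAt at h3 ⊢
      rw [hlt_iff] at h3 ⊢
      rcases hs with hs | hs <;> rcases h3 with h3 | h3 <;> omega
    -- downward monotonicity of p on [lo, hi)
    have hdown : ∀ (k : Nat) (i : Int), lo ≤ i → i + k < hi → p (i + k) = true → p i = true := by
      intro k
      induction k with
      | zero => intro i _ _ h; simpa using h
      | succ k ih =>
        intro i h1 h2 h3
        push_cast at h2 h3
        have heq : i + ((k : Int) + 1) = (i + 1) + (k : Int) := by ring
        rw [heq] at h2 h3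
        have hk : p (i + 1) = true := ih (i + 1) (by omega) (by omega) h3
        exact hstep i h1 (by omega) hk
    set T := scanT p (hi - lo).toNat lo with hT
    have hT1 : lo ≤ T := scanT_ge p (hi - lo).toNat lo
    have hT2 : T ≤ hi := by have := scanT_le p (hi - lo).toNat lo; omega
    have htrue : ∀ j, lo ≤ j → j < T → p j = true := fun j hj1 hj2 => scanT_true p _ lo j hj1 hj2
    have hfalse : ∀ j, T ≤ j → j < hi → p j = false := by
      intro j hj1 hj2
      rcases scanT_stop p (hi - lo).toNat lo with h | h
      · omega
      · rw [← hT] at h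
        by_contra hx
        have hjt : p j = true := by simpa using hx
        have hc : T + (((j - T).toNat : Int)) = j := by omega
        have := hdown (j - T).toNat T hT1 (by omega) (by rw [hc]; exact hjt)
        rw [this] at h; exact absurd h (by simp)
    -- B's side equals T
    have hB : bsearchLoop p ((hi - lo).toNat + 1) lo (hi - 1) hi = T := by
      rw [bsearch_eq_bin]
      exact binPhase_eq p lo hi T htrue hfalse ((hi - lo).toNat + 1) lo (hi - 1) hi
        (le_refl lo) (le_refl (hi - 1)) hT1 hT2 (by omega) (by omega)
    rw [hB]
    -- A's side equals T
    by_cases hpl : p lo = true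
    · rw [if_neg (by rw [hpl]; simp)]
      have hg := gallop_inv p lo hi T htrue hT2 ((hi - lo).toNat + 1) 1 lo
        (le_refl 1) (le_refl lo) (by omega) hpl (by omega)
      obtain ⟨hg1, hg2, hg3, hg4⟩ := hg
      set r := gallopPhase p lo hi (hi - lo) ((hi - lo).toNat + 1) 1 lo with hr
      have hidxT : r.2 < T := by
        by_contra hx
        push Not at hx
        have := hfalse r.2 hx hg3
        rw [hg1] at this; exact absurd this (by simp)
      have hminle : min (lo + r.1) (hi - 1) ≤ hi - 1 := min_le_right _ _
      exact binPhase_eq p lo hi T htrue hfalse ((hi - lo).toNat + 1)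
        (r.2 + 1) (min (lo + r.1) (hi - 1)) (min (lo + r.1) (hi - 1) + 1)
        (by omega) (by omega) (by omega) (by omega) rfl (by omega)
    · have hplf : p lo = false := by simpa using hpl
      rw [if_pos hplf]
      have : T = lo := by
        by_contra hx
        have := htrue lo (le_refl lo) (by omega)
        rw [hplf] at this; exact absurd this (by simp)
      omega
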